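-- pv_equiv track=rewrite | github.com/SheetMusic-Team-3/sheet-music-plus-plus | flask_app_old2.py | sparse_tensor_to_strs
-- ===== SOURCE A (Python) =====
-- def sparse_tensor_to_strs(sparse_tensor):
-- 	indices = sparse_tensor[0][0]
-- 	values = sparse_tensor[0][1]
-- 	dense_shape = sparse_tensor[0][2]
--
-- 	strs = [ [] for i in range(dense_shape[0]) ]
--
-- 	string = []
-- 	ptr = 0
-- 	b = 0
--
-- 	for i in range(len(indices)):
-- 		if indices[i][0] != b:
-- 			strs[b] = string
-- 			string = []
-- 			b = indices[i][0]
--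
-- 		string.append(values[ptr])
--
-- 		ptr = ptr + 1
--
-- 	strs[b] = string
--
-- 	return strs
-- ===== SOURCE B (Python) =====
-- from itertools import groupby
--
--
-- def sparse_tensor_to_strs(sparse_tensor):
--     indices, values, dense_shape = sparse_tensor[0]
--
--     strs = [[] for _ in range(dense_shape[0])]
--
--     idx = 0
--     for b, run in groupby(indices, key=lambda ind: ind[0]):
--         n = len(list(run))
--         strs[b] = values[idx:idx + n]
--         idx += n
--
--     return strs
-- ===== Notes on version B (the rewrite author's own statement) =====
-- stated objective: simpler
-- what changed: Replaces A's element-by-element loop with mutable flush state (string, ptr, b) by itertools.groupby runs of equal batch index, assigning each batch one contiguous slice values[idx:idx+n].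
import Mathlib
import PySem

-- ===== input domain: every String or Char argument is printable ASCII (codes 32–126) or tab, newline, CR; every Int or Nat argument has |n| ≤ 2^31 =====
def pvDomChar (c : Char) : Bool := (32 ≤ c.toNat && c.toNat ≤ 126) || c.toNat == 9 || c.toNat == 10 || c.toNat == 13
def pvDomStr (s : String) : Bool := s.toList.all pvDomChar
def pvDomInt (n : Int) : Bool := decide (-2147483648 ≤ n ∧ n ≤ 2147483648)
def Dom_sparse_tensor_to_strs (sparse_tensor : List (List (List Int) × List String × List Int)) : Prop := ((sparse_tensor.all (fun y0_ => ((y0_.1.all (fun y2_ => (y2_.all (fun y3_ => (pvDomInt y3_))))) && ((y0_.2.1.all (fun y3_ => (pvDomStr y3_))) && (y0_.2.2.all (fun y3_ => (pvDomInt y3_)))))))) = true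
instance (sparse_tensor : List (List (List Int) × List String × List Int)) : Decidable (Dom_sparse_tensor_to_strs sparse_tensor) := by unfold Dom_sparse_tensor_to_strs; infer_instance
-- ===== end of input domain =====

-- B replaces A's element-by-element flush loop (mutable string/ptr/b state) by grouping the
-- index rows into runs of equal batch index and assigning each run one slice of values;
-- objective: simpler. Equivalence is claimed on the return value (neither version mutates its argument).

-- ===== PORT A =====
def sparse_tensor_to_strs (sparse_tensor : List (List (List Int) × List String × List Int)) : List (List String) :=
  let t := (PySem.List.pyGet? sparse_tensor 0).getD ([], [], [])
  let indices := t.1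
  let values := t.2.1
  let dense_shape := t.2.2
  let strs : List (List String) :=
    (PySem.List.pyRange 0 (PySem.List.pyGetD dense_shape 0 0)).map (fun _ => [])
  -- state (strs, string, ptr, b)
  let r := (PySem.List.pyRange 0 ((indices.length : Int))).foldl
    (fun (st : List (List String) × List String × Int × Int) i =>
      let ind := PySem.List.pyGetD indices i []
      let k := PySem.List.pyGetD ind 0 0
      let st' := if k ≠ st.2.2.2 then (PySem.List.pySetD st.1 st.2.2.2 st.2.1, ([] : List String), st.2.2.1, k) else st
      (st'.1, st'.2.1 ++ [PySem.List.pyGetD values st'.2.2.1 ""], st'.2.2.1 + 1, st'.2.2.2))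
    (strs, [], 0, 0)
  PySem.List.pySetD r.1 r.2.2.2 r.2.1

-- ===== PORT B =====
-- key of one index row: ind[0]
def pvKey (ind : List Int) : Int := PySem.List.pyGetD ind 0 0

-- itertools.groupby(indices, key=λ ind, ind[0]) with run lengths: open run (k, n) in front
def pvRunsFrom (k : Int) (n : Nat) : List (List Int) → List (Int × Nat)
  | [] => [(k, n)]
  | ind :: rest => if pvKey ind = k then pvRunsFrom k (n + 1) rest else (k, n) :: pvRunsFrom (pvKey ind) 1 rest

def pvRuns : List (List Int) → List (Int × Nat)
  | [] => []
  | ind :: rest => pvRunsFrom (pvKey ind) 1 rest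

def sparse_tensor_to_strs_alt (sparse_tensor : List (List (List Int) × List String × List Int)) : List (List String) :=
  let t := (PySem.List.pyGet? sparse_tensor 0).getD ([], [], [])
  let indices := t.1
  let values := t.2.1
  let dense_shape := t.2.2
  let strs : List (List String) :=
    (PySem.List.pyRange 0 (PySem.List.pyGetD dense_shape 0 0)).map (fun _ => [])
  -- state (strs, idx); per run (b, n): strs[b] = values[idx : idx+n]; idx += n
  ((pvRuns indices).foldl
    (fun (st : List (List String) × Int) bn =>
      (PySem.List.pySetD st.1 bn.1 (PySem.List.slice values (some st.2) (some (st.2 + (bn.2 : Int)))), st.2 + (bn.2 : Int)))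
    (strs, 0)).1

-- ===== PRECONDITION & SPEC =====
-- Pre_ excludes exactly the inputs on which A raises: empty sparse_tensor, empty dense_shape,
-- dense_shape[0] < 1 (the final strs[0]/strs[b] assignment needs a non-empty strs), an empty
-- index row (indices[i][0] raises), a batch index outside Python's wrap range [-m, m), or
-- fewer values than index rows (values[ptr] raises).
def Pre_sparse_tensor_to_strs (sparse_tensor : List (List (List Int) × List String × List Int)) : Prop :=
  sparse_tensor ≠ [] ∧
  (sparse_tensor.headI).2.2 ≠ [] ∧
  1 ≤ (sparse_tensor.headI).2.2.headI ∧
  (sparse_tensor.headI).1.length ≤ (sparse_tensor.headI).2.1.length ∧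
  ∀ ind ∈ (sparse_tensor.headI).1,
    ind ≠ [] ∧ -((sparse_tensor.headI).2.2.headI) ≤ ind.headI ∧ ind.headI < (sparse_tensor.headI).2.2.headI

instance (sparse_tensor : List (List (List Int) × List String × List Int)) : Decidable (Pre_sparse_tensor_to_strs sparse_tensor) := by unfold Pre_sparse_tensor_to_strs; infer_instance

def pvWitness_sparse_tensor_to_strs : (List (List (List Int) × List String × List Int)) :=
  [([[0], [1], [1]], ["a", "b", "c"], [2])]

def Spec_sparse_tensor_to_strs (sparse_tensor : List (List (List Int) × List String × List Int)) (out : List (List String)) : Prop := out = sparse_tensor_to_strs_alt sparse_tensor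
instance (sparse_tensor : List (List (List Int) × List String × List Int)) (out : List (List String)) : Decidable (Spec_sparse_tensor_to_strs sparse_tensor out) := by unfold Spec_sparse_tensor_to_strs; infer_instance

-- ===== CLAIM (what is proved, stated in full; the proofs are below) =====
def Claim_equal_sparse_tensor_to_strs : Prop := ∀ (sparse_tensor : List (List (List Int) × List String × List Int)), Dom_sparse_tensor_to_strs sparse_tensor → Pre_sparse_tensor_to_strs sparse_tensor → Spec_sparse_tensor_to_strs sparse_tensor (sparse_tensor_to_strs sparse_tensor)

-- ===== LEMMAS AND PROOFS =====

-- A's loop step, as a fold over the index rows themselves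
def pvF (values : List String) (st : List (List String) × List String × Int × Int) (ind : List Int) :
    List (List String) × List String × Int × Int :=
  let k := PySem.List.pyGetD ind 0 0
  let st' := if k ≠ st.2.2.2 then (PySem.List.pySetD st.1 st.2.2.2 st.2.1, ([] : List String), st.2.2.1, k) else st
  (st'.1, st'.2.1 ++ [PySem.List.pyGetD values st'.2.2.1 ""], st'.2.2.1 + 1, st'.2.2.2)

-- B's per-run step
def pvG (values : List String) (st : List (List String) × Int) (bn : Int × Nat) : List (List String) × Int :=
  (PySem.List.pySetD st.1 bn.1 (PySem.List.slice values (some st.2) (some (st.2 + (bn.2 : Int)))), st.2 + (bn.2 : Int))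

theorem pv_getD_eq (values : List String) (s n : Nat) (h : s + n < values.length) :
    PySem.List.pyGetD values ((s : Int) + (n : Int)) "" = values[s + n]'h := by
  have h2 : ((s : Int) + (n : Int)) = (((s + n : Nat)) : Int) := by push_cast; ring
  rw [h2, PySem.List.pyGetD_natCast]
  exact List.getD_eq_getElem values "" h

theorem pv_slice_snoc (values : List String) (s n : Nat) (h : s + n < values.length) :
    PySem.List.slice values (some (s : Int)) (some ((s : Int) + (n : Int))) ++ [PySem.List.pyGetD values ((s : Int) + (n : Int)) ""]
      = PySem.List.slice values (some (s : Int)) (some ((s : Int) + ((n + 1 : Nat) : Int))) := by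
  rw [PySem.List.slice_natCast_add, PySem.List.slice_natCast_add, List.take_add_one,
    pv_getD_eq values s n h]
  have h3 : (List.drop s values)[n]? = some (values[s + n]'h) := by
    rw [List.getElem?_drop]
    exact List.getElem?_eq_getElem h
  simp [h3]

theorem pv_slice_one (values : List String) (s n : Nat) (h : s + n < values.length) :
    PySem.List.slice values (some (((s + n : Nat)) : Int)) (some ((((s + n : Nat)) : Int) + ((1 : Nat) : Int)))
      = [PySem.List.pyGetD values ((s : Int) + (n : Int)) ""] := by
  rw [PySem.List.slice_natCast_add, pv_getD_eq values s n h, List.drop_eq_getElem_cons h]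
  rfl

-- the final 'strs[b] = string' applied to A's loop state
def pvFin (r : List (List String) × List String × Int × Int) : List (List String) :=
  PySem.List.pySetD r.1 r.2.2.2 r.2.1

theorem pv_main (values : List String) (inds : List (List Int)) (strs : List (List String)) (b : Int)
    (s n : Nat) (hlen : s + n + inds.length <= values.length) :
    pvFin
      (inds.foldl (pvF values)
        (strs, PySem.List.slice values (some (s : Int)) (some ((s : Int) + (n : Int))), (s : Int) + (n : Int), b))
      = ((pvRunsFrom b n inds).foldl (pvG values) (strs, (s : Int))).1 := by
  induction inds generalizing strs b s n with
  | nil =>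
    simp [pvRunsFrom, pvG, pvFin]
  | cons ind rest ih =>
    have hsn : s + n < values.length := by simp at hlen; omega
    by_cases hk : pvKey ind = b
    · -- same run: string grows by one element
      have hstep : pvF values (strs, PySem.List.slice values (some (s : Int)) (some ((s : Int) + (n : Int))), (s : Int) + (n : Int), b) ind
          = (strs, PySem.List.slice values (some (s : Int)) (some ((s : Int) + ((n + 1 : Nat) : Int))), (s : Int) + ((n + 1 : Nat) : Int), b) := by
        simp only [pvF, pvKey] at hk ⊢
        rw [if_neg (by simpa using hk)]
        rw [pv_slice_snoc values s n hsn]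
        have hp : ((s : Int) + (n : Int)) + 1 = (s : Int) + ((n + 1 : Nat) : Int) := by push_cast; ring
        rw [hp]
      rw [List.foldl_cons, hstep]
      simp only [pvRunsFrom, if_pos hk]
      exact ih strs b s (n + 1) (by simp at hlen ⊢; omega)
    · -- run boundary: flush strs[b], start a new run at offset s+n
      have hstep : pvF values (strs, PySem.List.slice values (some (s : Int)) (some ((s : Int) + (n : Int))), (s : Int) + (n : Int), b) ind
          = (PySem.List.pySetD strs b (PySem.List.slice values (some (s : Int)) (some ((s : Int) + (n : Int)))),
             PySem.List.slice values (some (((s + n : Nat)) : Int)) (some ((((s + n : Nat)) : Int) + ((1 : Nat) : Int))),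
             (((s + n : Nat)) : Int) + ((1 : Nat) : Int), pvKey ind) := by
        simp only [pvF, pvKey] at hk ⊢
        rw [if_pos (by simpa using hk)]
        rw [List.nil_append, ← pv_slice_one values s n hsn]
        have hp : ((s : Int) + (n : Int)) + 1 = (((s + n : Nat)) : Int) + ((1 : Nat) : Int) := by push_cast; ring
        rw [hp]
      rw [List.foldl_cons, hstep]
      simp only [pvRunsFrom, if_neg hk, List.foldl_cons]
      have hG : pvG values (strs, (s : Int)) (b, n)
          = (PySem.List.pySetD strs b (PySem.List.slice values (some (s : Int)) (some ((s : Int) + (n : Int)))), (((s + n : Nat)) : Int)) := by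
        simp only [pvG]
        have hp : (s : Int) + (n : Int) = (((s + n : Nat)) : Int) := by push_cast; ring
        rw [hp]
      rw [hG]
      exact ih _ (pvKey ind) (s + n) 1 (by simp at hlen ⊢; omega)

theorem pv_set_head_nil (values : List String) (m : Int) (hm : 1 ≤ m) :
    pvG values (((PySem.List.pyRange 0 m).map (fun _ => ([] : List String))), 0) (0, 0)
      = (((PySem.List.pyRange 0 m).map (fun _ => ([] : List String))), 0) := by
  have hsl : PySem.List.slice values (some (0 : Int)) (some ((0 : Int) + ((0 : Nat) : Int))) = [] := by
    have := PySem.List.slice_natCast_add values 0 0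
    simpa using this
  simp only [pvG, hsl]
  rw [PySem.List.pyRange_one_cons (show (0 : Int) < m by omega)]
  simp [PySem.List.pySetD_of_nonneg]

theorem pv_runs0 (values : List String) (inds : List (List Int)) (strs0 : List (List String))
    (h0 : pvG values (strs0, 0) (0, 0) = (strs0, 0)) :
    ((pvRunsFrom 0 0 inds).foldl (pvG values) (strs0, 0)).1
      = ((pvRuns inds).foldl (pvG values) (strs0, 0)).1 := by
  cases inds with
  | nil => simp [pvRunsFrom, pvRuns, h0]
  | cons ind rest =>
    by_cases hk : pvKey ind = 0
    · simp [pvRunsFrom, pvRuns, hk]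
    · simp [pvRunsFrom, pvRuns, hk, h0]

-- ===== VERDICT (by name: the statement is the Claim_ definition above) =====
theorem sparse_tensor_to_strs_spec : Claim_equal_sparse_tensor_to_strs := by
  intro sp _ hp
  unfold Spec_sparse_tensor_to_strs
  obtain ⟨hne, hds, hm, hlen, hall⟩ := hp
  cases sp with
  | nil => exact absurd rfl hne
  | cons t tl =>
    obtain ⟨indices, values, ds⟩ := t
    cases ds with
    | nil => simp [List.headI] at hds
    | cons m ds' =>
      simp only [List.headI] at hm hlen hall
      -- the initial strs list
      have hm0 : PySem.List.pyGetD (m :: ds') 0 0 = m := by simp [pysem]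
      have ht : (PySem.List.pyGet? (((indices, values, m :: ds') : List (List Int) × List String × List Int) :: tl) 0).getD ([], [], [])
          = ((indices, values, m :: ds') : List (List Int) × List String × List Int) := by
        simp [pysem]
      have hfun : (fun (st : List (List String) × List String × Int × Int) i =>
            let ind := PySem.List.pyGetD indices i []
            let k := PySem.List.pyGetD ind 0 0
            let st' := if k ≠ st.2.2.2 then (PySem.List.pySetD st.1 st.2.2.2 st.2.1, ([] : List String), st.2.2.1, k) else st
            (st'.1, st'.2.1 ++ [PySem.List.pyGetD values st'.2.2.1 ""], st'.2.2.1 + 1, st'.2.2.2))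
          = (fun acc j => pvF values acc (PySem.List.pyGetD indices j [])) := rfl
      have hfunB : (fun (st : List (List String) × Int) (bn : Int × Nat) =>
            (PySem.List.pySetD st.1 bn.1 (PySem.List.slice values (some st.2) (some (st.2 + (bn.2 : Int)))), st.2 + (bn.2 : Int)))
          = pvG values := rfl
      simp only [sparse_tensor_to_strs, sparse_tensor_to_strs_alt, ht, hm0, hfun, hfunB]
      rw [PySem.List.foldl_pyRange_zero_pyGetD' indices [] (pvF values) _]
      have hsl : PySem.List.slice values (some ((0 : Nat) : Int)) (some (((0 : Nat) : Int) + ((0 : Nat) : Int))) = [] := by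
        rw [PySem.List.slice_natCast_add]
        rfl
      have H := pv_main values indices ((PySem.List.pyRange 0 m).map (fun _ => ([] : List String))) 0 0 0 (by omega)
      rw [hsl] at H
      simp only [Nat.cast_zero, add_zero] at H
      simp only [pvFin] at H
      rw [H]
      exact pv_runs0 values indices ((PySem.List.pyRange 0 m).map (fun _ => ([] : List String))) (pv_set_head_nil values m hm)
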